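-- pv_equiv track=rewrite | github.com/swalihtp/Daily-Task | 2506-count-pairs-of-similar-strings/2506-count-pairs-of-similar-strings.py | similarPairs
-- ===== SOURCE A (Python) =====
-- from typing import List
--
-- def similarPairs(words: List[str]) -> int:
--     ans=0
--     n = len(words)
--     for i in range(n):
--         main  = set(words[i])
--         for j in range(i+1,n):
--             temp = set(words[j])
--             if main == temp:
--                 ans+=1
--     return ans
-- ===== SOURCE B (Python) =====
-- from typing import List
--
-- def similarPairs(words: List[str]) -> int:
--     cnt = {}
--     for w in words:
--         k = ''.join(sorted(set(w)))
--         cnt[k] = cnt.get(k, 0) + 1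
--     return sum(c * (c - 1) // 2 for c in cnt.values())
-- ===== Notes on version B (the rewrite author's own statement) =====
-- stated objective: faster
-- what changed: Instead of comparing the character sets of all pairs with two nested loops, B computes a canonical key (sorted character set) for each word once, counts key multiplicities in a dict in one pass, and sums k*(k-1)//2 per group.
import Mathlib
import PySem

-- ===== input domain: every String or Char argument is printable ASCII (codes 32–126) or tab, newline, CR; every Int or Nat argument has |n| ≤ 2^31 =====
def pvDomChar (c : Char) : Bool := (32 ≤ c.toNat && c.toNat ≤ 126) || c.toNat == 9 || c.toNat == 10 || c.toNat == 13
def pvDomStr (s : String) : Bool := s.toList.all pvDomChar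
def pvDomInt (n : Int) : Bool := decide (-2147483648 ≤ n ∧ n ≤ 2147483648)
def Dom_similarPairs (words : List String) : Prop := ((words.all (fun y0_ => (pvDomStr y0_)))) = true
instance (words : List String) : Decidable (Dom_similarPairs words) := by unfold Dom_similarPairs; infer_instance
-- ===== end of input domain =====

-- B replaces A's O(n^2) pairwise set comparisons by one pass grouping words under a
-- canonical key (sorted character set) and summing k*(k-1)//2 per group.

-- ===== PORT A =====
-- literal transliteration of A: nested index loops, set(words[i]) == set(words[j])
def similarPairs (words : List String) : Int :=
  let n : Int := words.length
  (PySem.List.pyRange 0 n).foldl (fun ans i =>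
    let main : PySem.Set Char := PySem.Set.ofList (PySem.List.pyGetD words i "").toList
    (PySem.List.pyRange (i + 1) n).foldl (fun ans j =>
      let temp : PySem.Set Char := PySem.Set.ofList (PySem.List.pyGetD words j "").toList
      if PySem.Set.equal main temp then ans + 1 else ans) ans) 0

-- ===== PORT B =====
-- ''.join(sorted(set(w))) : sorted over a char set (no key) is order-independent; the join of
-- single characters is String.ofList — exact on the domain.
def pvKey (w : String) : String :=
  String.ofList (PySem.List.sorted (PySem.Set.ofList w.toList) (fun c => c))

def similarPairs_alt (words : List String) : Int :=
  let cnt : PySem.Dict String Int := words.foldl (fun d w =>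
    let k := pvKey w
    d.insert k (d.getD k 0 + 1)) PySem.Dict.empty
  (cnt.values.map (fun c => PySem.Int.floordiv (c * (c - 1)) 2)).sum

-- ===== PRECONDITION & SPEC =====
def Spec_similarPairs (words : List String) (out : Int) : Prop := out = similarPairs_alt words
instance (words : List String) (out : Int) : Decidable (Spec_similarPairs words out) := by unfold Spec_similarPairs; infer_instance

-- ===== CLAIM (what is proved, stated in full; the proofs are below) =====
def Claim_equal_similarPairs : Prop := ∀ (words : List String), Dom_similarPairs words → Spec_similarPairs words (similarPairs words)

-- ===== LEMMAS AND PROOFS =====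

-- A's inner test on the raw words
def pvPCf : List String → Int
  | [] => 0
  | w :: t => (t.countP (fun v => PySem.Set.equal (PySem.Set.ofList w.toList) (PySem.Set.ofList v.toList)) : Int) + pvPCf t

-- the same pair count on the key list
def pvPC : List String → Int
  | [] => 0
  | k :: t => (t.count k : Int) + pvPC t

-- B's value as a function of the key list
def pvT (ks : List String) : Int :=
  ((PySem.Set.ofList ks).map (fun k =>
    PySem.Int.floordiv ((ks.count k : Int) * ((ks.count k : Int) - 1)) 2)).sum

lemma pv_g_succ (c : Int) :
    PySem.Int.floordiv ((c + 1) * ((c + 1) - 1)) 2 = PySem.Int.floordiv (c * (c - 1)) 2 + c := by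
  obtain ⟨k, hk⟩ := Int.even_mul_succ_self (c - 1)
  rw [show (c + 1) * ((c + 1) - 1) = 2 * (k + c) by linarith,
      show c * (c - 1) = 2 * k by linarith,
      PySem.Int.floordiv_eq_ediv_of_pos (by norm_num),
      PySem.Int.floordiv_eq_ediv_of_pos (by norm_num),
      Int.mul_ediv_cancel_left _ (by norm_num), Int.mul_ediv_cancel_left _ (by norm_num)]

lemma pv_sum_eq (ws : List String) :
    ((List.range ws.length).map (fun k =>
      ((ws.drop (k + 1)).countP (fun v =>
        PySem.Set.equal (PySem.Set.ofList (ws.getD k "").toList) (PySem.Set.ofList v.toList)) : Int))).sum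
      = pvPCf ws := by
  induction ws with
  | nil => simp [pvPCf]
  | cons w t ih =>
    rw [show (w :: t).length = t.length + 1 from rfl, List.range_succ_eq_map]
    simp only [List.map_cons, List.map_map, List.sum_cons]
    rw [pvPCf, ← ih]
    rfl

lemma pv_A_eq (words : List String) : similarPairs words = pvPCf words := by
  unfold similarPairs
  simp only
  have hcongr := PySem.List.foldl_congr_mem (PySem.List.pyRange 0 (words.length : Int))
      (fun ans i =>
        (PySem.List.pyRange (i + 1) (words.length : Int)).foldl (fun ans j =>
          if PySem.Set.equal (PySem.Set.ofList (PySem.List.pyGetD words i "").toList)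
              (PySem.Set.ofList (PySem.List.pyGetD words j "").toList) then ans + 1 else ans) ans)
      (fun ans i => ans + (((words.drop (i.toNat + 1)).countP (fun v =>
        PySem.Set.equal (PySem.Set.ofList (PySem.List.pyGetD words i "").toList)
          (PySem.Set.ofList v.toList)) : Nat) : Int))
      0
      (by
        intro acc i hi
        have h0 : (0:Int) ≤ i + 1 := by
          have := (PySem.List.mem_pyRange_one).mp hi
          omega
        simp only
        rw [PySem.List.foldl_pyRange_pyGetD' words ""
              (fun ans v => if PySem.Set.equal (PySem.Set.ofList (PySem.List.pyGetD words i "").toList)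
                  (PySem.Set.ofList v.toList) then ans + 1 else ans) acc h0,
            PySem.List.foldl_if_add_one]
        have h1 : (i + 1).toNat = i.toNat + 1 := by
          have := (PySem.List.mem_pyRange_one).mp hi
          omega
        rw [h1])
  rw [hcongr, PySem.List.foldl_add]
  rw [PySem.List.pyRange_zero_natCast, List.map_map]
  rw [← pv_sum_eq words]
  simp only [zero_add]
  apply congrArg
  apply List.map_congr_left
  intro k hk
  simp [PySem.List.pyGetD_natCast, List.getD]

lemma pv_key_eq (w v : String) :
    PySem.Set.equal (PySem.Set.ofList w.toList) (PySem.Set.ofList v.toList) = (pvKey w == pvKey v) := by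
  rw [Bool.eq_iff_iff, PySem.Set.equal_iff, beq_iff_eq]
  unfold pvKey
  constructor
  · intro h
    congr 1
    rw [PySem.List.sorted_id_eq_sorted_id_iff_perm,
        List.perm_ext_iff_of_nodup (PySem.Set.nodup_ofList _) (PySem.Set.nodup_ofList _)]
    exact h
  · intro h
    have h2 := congrArg String.toList h
    simp only [String.toList_ofList] at h2
    rw [PySem.List.sorted_id_eq_sorted_id_iff_perm] at h2
    exact (List.perm_ext_iff_of_nodup (PySem.Set.nodup_ofList _) (PySem.Set.nodup_ofList _)).mp h2

lemma pv_PCf_eq_PC (ws : List String) : pvPCf ws = pvPC (ws.map pvKey) := by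
  induction ws with
  | nil => rfl
  | cons w t ih =>
    rw [pvPCf, List.map_cons, pvPC, ih]
    congr 2
    rw [List.count_eq_countP, List.countP_map]
    apply List.countP_congr
    intro v _
    simp only [Function.comp_apply, pv_key_eq w v]
    exact Bool.eq_iff_iff.mp (Bool.beq_comm (a := pvKey w) (b := pvKey v))

lemma pv_B_eq (words : List String) : similarPairs_alt words = pvT (words.map pvKey) := by
  unfold similarPairs_alt
  simp only
  have h : List.foldl (fun (d : PySem.Dict String Int) w =>
        d.insert (pvKey w) (d.getD (pvKey w) 0 + 1)) PySem.Dict.empty words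
      = PySem.Dict.counter (words.map pvKey) := by
    rw [← PySem.Dict.foldl_insert_getD_add_one_eq_counter, List.foldl_map]
  rw [h, show (PySem.Dict.counter (words.map pvKey)).values
        = (PySem.Dict.counter (words.map pvKey)).items.map (·.2) from rfl,
      PySem.Dict.items_counter, List.map_map]
  simp only [pvT]
  rw [List.map_map]
  apply congrArg
  apply List.map_congr_left
  intro k hk
  simp

lemma pv_T_cons (a : String) (ks : List String) :
    pvT (a :: ks) = (ks.count a : Int) + pvT ks := by
  unfold pvT
  set F : String → Int := fun k =>
    PySem.Int.floordiv (((a :: ks).count k : Int) * (((a :: ks).count k : Int) - 1)) 2 with hF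
  set G : String → Int := fun k =>
    PySem.Int.floordiv ((ks.count k : Int) * ((ks.count k : Int) - 1)) 2 with hG
  have hFa : F a = G a + (ks.count a : Int) := by
    simp only [hF, hG, List.count_cons_self]
    push_cast
    exact pv_g_succ _
  have hFne : ∀ k, k ≠ a → F k = G k := by
    intro k hk
    simp only [hF, hG, List.count_cons, beq_iff_eq, hk.symm, if_false, Nat.add_zero]
  by_cases ha : a ∈ ks
  · have hperm : (PySem.Set.ofList (a :: ks)).Perm (PySem.Set.ofList ks) := by
      rw [List.perm_ext_iff_of_nodup (PySem.Set.nodup_ofList _) (PySem.Set.nodup_ofList _)]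
      intro x
      simp only [PySem.Set.mem_ofList, List.mem_cons]
      constructor
      · rintro (rfl | h) <;> [exact ha; exact h]
      · exact Or.inr
    have haS : a ∈ PySem.Set.ofList ks := (PySem.Set.mem_ofList _ _).mpr ha
    have hperm2 := List.perm_cons_erase haS
    have hne : ∀ k ∈ (PySem.Set.ofList ks).erase a, k ≠ a := fun k hk =>
      ((PySem.Set.nodup_ofList ks).mem_erase_iff.mp hk).1
    calc ((PySem.Set.ofList (a :: ks)).map F).sum
        = ((PySem.Set.ofList ks).map F).sum := (hperm.map F).sum_eq
      _ = ((a :: (PySem.Set.ofList ks).erase a).map F).sum := (hperm2.map F).sum_eq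
      _ = F a + (((PySem.Set.ofList ks).erase a).map F).sum := by simp
      _ = G a + (ks.count a : Int) + (((PySem.Set.ofList ks).erase a).map G).sum := by
          rw [hFa, List.map_congr_left (fun k hk => hFne k (hne k hk))]
      _ = (ks.count a : Int) + (G a + (((PySem.Set.ofList ks).erase a).map G).sum) := by ring
      _ = (ks.count a : Int) + ((a :: (PySem.Set.ofList ks).erase a).map G).sum := by simp
      _ = (ks.count a : Int) + ((PySem.Set.ofList ks).map G).sum := by
          rw [((hperm2.map G).sum_eq).symm]
  · have hcnt : ks.count a = 0 := List.count_eq_zero.mpr ha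
    have hnotin : a ∉ PySem.Set.ofList ks := fun h => ha ((PySem.Set.mem_ofList _ _).mp h)
    have hperm : (PySem.Set.ofList (a :: ks)).Perm (a :: PySem.Set.ofList ks) := by
      rw [List.perm_ext_iff_of_nodup (PySem.Set.nodup_ofList _)
          (List.nodup_cons.mpr ⟨hnotin, PySem.Set.nodup_ofList _⟩)]
      intro x
      simp [PySem.Set.mem_ofList, List.mem_cons]
    have hFa0 : F a = 0 := by
      simp only [hF, List.count_cons_self, hcnt]
      rfl
    have hne : ∀ k ∈ PySem.Set.ofList ks, k ≠ a := by
      intro k hk h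
      exact hnotin (h ▸ hk)
    calc ((PySem.Set.ofList (a :: ks)).map F).sum
        = ((a :: PySem.Set.ofList ks).map F).sum := (hperm.map F).sum_eq
      _ = F a + ((PySem.Set.ofList ks).map F).sum := by simp
      _ = 0 + ((PySem.Set.ofList ks).map G).sum := by
          rw [hFa0, List.map_congr_left (fun k hk => hFne k (hne k hk))]
      _ = (ks.count a : Int) + ((PySem.Set.ofList ks).map G).sum := by
          rw [hcnt]; simp
  
lemma pv_PC_eq_T (ks : List String) : pvPC ks = pvT ks := by
  induction ks with
  | nil => rfl
  | cons a t ih => rw [pvPC, pv_T_cons, ih]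

-- ===== VERDICT (by name: the statement is the Claim_ definition above) =====
theorem similarPairs_spec : Claim_equal_similarPairs := by
  intro words _
  unfold Spec_similarPairs
  rw [pv_A_eq, pv_B_eq, pv_PCf_eq_PC, pv_PC_eq_T]
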